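-- pv_equiv track=rewrite | github.com/CARBON-XXX/SEDAC-V7.0-Pre-release-Test-Version | patch_vllm_surgical.py | _strip_sedac_blocks
-- ===== SOURCE A (Python) =====
-- def _strip_sedac_blocks(lines: list[str]) -> list[str]:
--     out = []
--     i = 0
--     while i < len(lines):
--         line = lines[i]
--         stripped = line.strip()
--
--         if stripped.startswith("SEDAC_PATCH_VERSION ="):
--             i += 1
--             continue
--
--         if stripped.startswith("self._sedac_patch_begin ="):
--             i += 1
--             while i < len(lines):
--                 if lines[i].strip().startswith("self._sedac_patch_end ="):
--                     i += 1
--                     break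
--                 i += 1
--             continue
--
--         if stripped.startswith("_sedac_patch_forward_begin ="):
--             i += 1
--             while i < len(lines):
--                 if lines[i].strip().startswith("_sedac_patch_forward_end ="):
--                     i += 1
--                     break
--                 i += 1
--             continue
--
--         if stripped == "# --- SEDAC DECODER PATCH ---":
--              i += 1
--              while i < len(lines):
--                  if lines[i].strip() == "# ---------------------------":
--                      i += 1
--                      break
--                  i += 1
--              continue
--
--         if stripped.startswith("Qwen2DecoderLayer.forward = _sedac_decoder_forward"):
--             i += 1
--             continue
--
--         out.append(line)
--         i += 1
--     return out
-- ===== SOURCE B (Python) =====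
-- _SEDAC_END_PREDS = {
--     "patch": lambda s: s.startswith("self._sedac_patch_end ="),
--     "forward": lambda s: s.startswith("_sedac_patch_forward_end ="),
--     "dec": lambda s: s == "# ---------------------------",
-- }
--
--
-- def _strip_sedac_blocks(lines: list[str]) -> list[str]:
--     out = []
--     skip = None  # key of the end predicate the current block is waiting for
--     for line in lines:
--         s = line.strip()
--         if skip is not None:
--             if _SEDAC_END_PREDS[skip](s):
--                 skip = None
--             continue
--         if s.startswith("SEDAC_PATCH_VERSION ="):
--             continue
--         if s.startswith("self._sedac_patch_begin ="):
--             skip = "patch"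
--         elif s.startswith("_sedac_patch_forward_begin ="):
--             skip = "forward"
--         elif s == "# --- SEDAC DECODER PATCH ---":
--             skip = "dec"
--         elif s.startswith("Qwen2DecoderLayer.forward = _sedac_decoder_forward"):
--             pass
--         else:
--             out.append(line)
--     return out
-- ===== Notes on version B (the rewrite author's own statement) =====
-- stated objective: simpler
-- what changed: Replaced the index-driven while loop with nested inner while-loops by a single flat for-pass carrying an explicit skip-state naming the end marker the current block waits for.
import Mathlib
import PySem

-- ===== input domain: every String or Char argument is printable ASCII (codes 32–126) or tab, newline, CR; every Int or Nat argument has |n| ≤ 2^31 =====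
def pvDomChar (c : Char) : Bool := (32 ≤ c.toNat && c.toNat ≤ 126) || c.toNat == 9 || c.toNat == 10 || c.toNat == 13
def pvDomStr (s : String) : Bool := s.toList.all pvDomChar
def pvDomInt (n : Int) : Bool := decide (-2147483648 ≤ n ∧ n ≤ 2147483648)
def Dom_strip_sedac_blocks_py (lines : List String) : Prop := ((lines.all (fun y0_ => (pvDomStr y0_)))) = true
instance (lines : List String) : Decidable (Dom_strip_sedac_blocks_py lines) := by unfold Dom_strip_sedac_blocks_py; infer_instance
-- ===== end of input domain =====

-- B replaces A's index-driven loop with nested inner while-loops by one flat pass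
-- carrying an explicit skip-state naming the end marker the current block waits for (objective: simpler).

-- ===== PORT A =====
-- inner while of A: consume lines up to and including the first one whose strip() satisfies p
def sedacSkipA (p : String → Bool) : List String → List String
  | [] => []
  | l :: rest => if p (PySem.Str.strip l) then rest else sedacSkipA p rest

theorem sedacSkipA_length_le (p : String → Bool) (xs : List String) :
    (sedacSkipA p xs).length ≤ xs.length := by
  induction xs with
  | nil => simp [sedacSkipA]
  | cons l rest ih =>
    simp only [sedacSkipA]
    split
    · simp
    · simp only [List.length_cons]; omega

def strip_sedac_blocks_py (lines : List String) : List String :=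
  match lines with
  | [] => []
  | line :: rest =>
    let stripped := PySem.Str.strip line
    if PySem.Str.startswith stripped "SEDAC_PATCH_VERSION =" then
      strip_sedac_blocks_py rest
    else if PySem.Str.startswith stripped "self._sedac_patch_begin =" then
      strip_sedac_blocks_py (sedacSkipA (fun s => PySem.Str.startswith s "self._sedac_patch_end =") rest)
    else if PySem.Str.startswith stripped "_sedac_patch_forward_begin =" then
      strip_sedac_blocks_py (sedacSkipA (fun s => PySem.Str.startswith s "_sedac_patch_forward_end =") rest)
    else if stripped == "# --- SEDAC DECODER PATCH ---" then
      strip_sedac_blocks_py (sedacSkipA (fun s => s == "# ---------------------------") rest)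
    else if PySem.Str.startswith stripped "Qwen2DecoderLayer.forward = _sedac_decoder_forward" then
      strip_sedac_blocks_py rest
    else
      line :: strip_sedac_blocks_py rest
termination_by lines.length
decreasing_by
  all_goals simp only [List.length_cons]
  all_goals first
    | exact Nat.lt_succ_of_le (sedacSkipA_length_le _ _)
    | omega

-- ===== PORT B =====
inductive SedacEnd
  | patchEnd
  | forwardEnd
  | decEnd
deriving DecidableEq, Repr

def sedacEndMatch : SedacEnd → String → Bool
  | .patchEnd, s => PySem.Str.startswith s "self._sedac_patch_end ="
  | .forwardEnd, s => PySem.Str.startswith s "_sedac_patch_forward_end ="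
  | .decEnd, s => s == "# ---------------------------"

def stripBStep (st : List String × Option SedacEnd) (line : String) :
    List String × Option SedacEnd :=
  let s := PySem.Str.strip line
  match st with
  | (out, some t) => if sedacEndMatch t s then (out, none) else (out, some t)
  | (out, none) =>
    if PySem.Str.startswith s "SEDAC_PATCH_VERSION =" then (out, none)
    else if PySem.Str.startswith s "self._sedac_patch_begin =" then (out, some .patchEnd)
    else if PySem.Str.startswith s "_sedac_patch_forward_begin =" then (out, some .forwardEnd)
    else if s == "# --- SEDAC DECODER PATCH ---" then (out, some .decEnd)
    else if PySem.Str.startswith s "Qwen2DecoderLayer.forward = _sedac_decoder_forward" then (out, none)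
    else (out ++ [line], none)

def strip_sedac_blocks_py_alt (lines : List String) : List String :=
  (lines.foldl stripBStep ([], none)).1

-- ===== PRECONDITION & SPEC =====
def Spec_strip_sedac_blocks_py (lines : List String) (out : List String) : Prop := out = strip_sedac_blocks_py_alt lines
instance (lines : List String) (out : List String) : Decidable (Spec_strip_sedac_blocks_py lines out) := by unfold Spec_strip_sedac_blocks_py; infer_instance

-- ===== CLAIM (what is proved, stated in full; the proofs are below) =====
def Claim_equal_strip_sedac_blocks_py : Prop := ∀ (lines : List String), Dom_strip_sedac_blocks_py lines → Spec_strip_sedac_blocks_py lines (strip_sedac_blocks_py lines)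

-- ===== LEMMAS AND PROOFS =====
theorem stripB_fold_eq (xs : List String) : ∀ acc : List String,
    ((xs.foldl stripBStep (acc, none)).1 = acc ++ strip_sedac_blocks_py xs) ∧
    (∀ t, (xs.foldl stripBStep (acc, some t)).1
          = acc ++ strip_sedac_blocks_py (sedacSkipA (fun s => sedacEndMatch t s) xs)) := by
  induction xs with
  | nil => intro acc; simp [strip_sedac_blocks_py, sedacSkipA]
  | cons line rest ih =>
    intro acc
    constructor
    · rw [List.foldl_cons, strip_sedac_blocks_py]
      simp only [stripBStep]
      split_ifs with h1 h2 h3 h4 h5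
      · exact (ih acc).1
      · exact (ih acc).2 .patchEnd
      · exact (ih acc).2 .forwardEnd
      · exact (ih acc).2 .decEnd
      · exact (ih acc).1
      · rw [(ih (acc ++ [line])).1, List.append_assoc]; rfl
    · intro t
      rw [List.foldl_cons]
      simp only [stripBStep, sedacSkipA]
      by_cases h : sedacEndMatch t (PySem.Str.strip line) = true
      · simp only [h, if_true]
        exact (ih acc).1
      · simp only [h, if_false, Bool.false_eq_true]
        exact (ih acc).2 t

-- ===== VERDICT (by name: the statement is the Claim_ definition above) =====
theorem strip_sedac_blocks_py_spec : Claim_equal_strip_sedac_blocks_py := by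
  intro lines _
  unfold Spec_strip_sedac_blocks_py strip_sedac_blocks_py_alt
  have h := (stripB_fold_eq lines []).1
  simp only [List.nil_append] at h
  exact h.symm
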